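-- pv_equiv track=rewrite | github.com/98coco/cs30_fall2022 | comp sci lectures/Week 3 Lecture 2.py | stringisLongerThanAll
-- ===== SOURCE A (Python) =====
-- def stringisLongerThanAll(l,s):
--     if l == []:
--         return True
--     else:
--         head = l[0]
--         tail = l[1:]
--         if len(head) > len(s):
--             return False
--         else:
--             return stringisLongerThanAll(tail,s)
-- ===== SOURCE B (Python) =====
-- def stringisLongerThanAll(l, s):
--     # One pass: compute the maximum element length, then compare once.
--     m = 0
--     for x in l:
--         if len(x) > m:
--             m = len(x)
--     return m <= len(s)
-- ===== Notes on version B (the rewrite author's own statement) =====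
-- stated objective: faster
-- what changed: Replaced head/tail recursion (which copies the tail with l[1:] at every step) by a single iterative pass that accumulates the maximum element length and compares it to len(s) once.
import Mathlib
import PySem

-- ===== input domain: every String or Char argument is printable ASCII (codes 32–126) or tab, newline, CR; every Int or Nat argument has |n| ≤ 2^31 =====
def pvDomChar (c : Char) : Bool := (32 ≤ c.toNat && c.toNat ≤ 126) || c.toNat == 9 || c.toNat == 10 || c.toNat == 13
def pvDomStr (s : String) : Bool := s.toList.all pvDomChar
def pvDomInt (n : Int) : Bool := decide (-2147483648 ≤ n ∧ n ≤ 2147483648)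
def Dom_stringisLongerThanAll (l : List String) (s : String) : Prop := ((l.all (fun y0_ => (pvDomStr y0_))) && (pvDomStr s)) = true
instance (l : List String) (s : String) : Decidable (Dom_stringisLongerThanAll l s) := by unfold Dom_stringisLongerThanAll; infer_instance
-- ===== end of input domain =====

-- ===== PORT A =====
def stringisLongerThanAll (l : List String) (s : String) : Bool :=
  match l with
  | [] => true
  | head :: tail =>
    if PySem.Str.len head > PySem.Str.len s then false
    else stringisLongerThanAll tail s

-- ===== PORT B =====
-- One pass accumulating the maximum element length, then a single comparison.
def stringisLongerThanAll_alt (l : List String) (s : String) : Bool :=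
  let m := l.foldl (fun m x => if PySem.Str.len x > m then PySem.Str.len x else m) 0
  decide (m ≤ PySem.Str.len s)

-- ===== PRECONDITION & SPEC =====
def Spec_stringisLongerThanAll (l : List String) (s : String) (out : Bool) : Prop := out = stringisLongerThanAll_alt l s
instance (l : List String) (s : String) (out : Bool) : Decidable (Spec_stringisLongerThanAll l s out) := by unfold Spec_stringisLongerThanAll; infer_instance

-- ===== CLAIM (what is proved, stated in full; the proofs are below) =====
def Claim_equal_stringisLongerThanAll : Prop := ∀ (l : List String) (s : String), Dom_stringisLongerThanAll l s → Spec_stringisLongerThanAll l s (stringisLongerThanAll l s)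

-- ===== LEMMAS AND PROOFS =====

-- ===== helper lemmas == =====
theorem foldl_max_le (l : List String) (m k : Int) :
    (l.foldl (fun m x => if PySem.Str.len x > m then PySem.Str.len x else m) m ≤ k)
      ↔ (m ≤ k ∧ ∀ x ∈ l, PySem.Str.len x ≤ k) := by
  induction l generalizing m with
  | nil => simp
  | cons h t ih =>
    simp only [List.foldl_cons, ih, List.mem_cons]
    constructor
    · rintro ⟨h1, h2⟩
      split_ifs at h1 with hc
      · exact ⟨by omega, fun x hx => hx.elim (fun e => e ▸ h1) (h2 x)⟩
      · exact ⟨h1, fun x hx => hx.elim (fun e => e ▸ (by omega : PySem.Str.len h ≤ k)) (h2 x)⟩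
    · rintro ⟨h1, h2⟩
      refine ⟨?_, fun x hx => h2 x (Or.inr hx)⟩
      split_ifs with hc
      · exact h2 h (Or.inl rfl)
      · exact h1

theorem A_eq_all (l : List String) (s : String) :
    stringisLongerThanAll l s = decide (∀ x ∈ l, PySem.Str.len x ≤ PySem.Str.len s) := by
  induction l with
  | nil => simp [stringisLongerThanAll]
  | cons h t ih =>
    simp only [stringisLongerThanAll, ih]
    split_ifs with hc
    · symm
      simp only [decide_eq_false_iff_not]
      intro hall
      exact absurd (hall h (List.mem_cons_self ..)) (by omega)
    · rw [decide_eq_decide]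
      constructor
      · rintro hall x hx
        rcases List.mem_cons.mp hx with rfl | hx'
        · omega
        · exact hall x hx'
      · intro hall x hx
        exact hall x (List.mem_cons_of_mem _ hx)

-- ===== VERDICT (by name: the statement is the Claim_ definition above) =====
theorem stringisLongerThanAll_spec : Claim_equal_stringisLongerThanAll := by
  intro l s _
  unfold Spec_stringisLongerThanAll stringisLongerThanAll_alt
  rw [A_eq_all]
  simp only [decide_eq_decide, foldl_max_le]
  have : (0:Int) ≤ PySem.Str.len s := by
    simp [PySem.Str.len]
  tauto
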